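-- pv_equiv track=rewrite | github.com/zake1416/nira-project | iso-onboarding-toolkit/src/iso_trust/pipelines/dagster_pipeline.py | _dst_metrics
-- ===== SOURCE A (Python) =====
-- def _dst_metrics(day_info):
--     total_days = len(day_info)
--     normal_days = sum(1 for d in day_info.values() if d["type"] == "NORMAL")
--     spring_days = sum(1 for d in day_info.values() if d["type"] == "SPRING_FORWARD")
--     fall_days = sum(1 for d in day_info.values() if d["type"] == "FALL_BACK")
--
--     return {
--         "total_days": total_days,
--         "normal_days": normal_days,
--         "spring_forward_days": spring_days,
--         "fall_back_days": fall_days,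
--         "dst_days": spring_days + fall_days,
--     }
-- ===== SOURCE B (Python) =====
-- def _dst_metrics(day_info):
--     counts = {}
--     for d in day_info.values():
--         t = d["type"]
--         counts[t] = counts.get(t, 0) + 1
--     spring_days = counts.get("SPRING_FORWARD", 0)
--     fall_days = counts.get("FALL_BACK", 0)
--     return {
--         "total_days": len(day_info),
--         "normal_days": counts.get("NORMAL", 0),
--         "spring_forward_days": spring_days,
--         "fall_back_days": fall_days,
--         "dst_days": spring_days + fall_days,
--     }
-- ===== Notes on version B (the rewrite author's own statement) =====
-- stated objective: simpler
-- what changed: B replaces A's three separate scans over day_info.values() (one per day type) with a single pass that builds a type->count dictionary and then reads the three counts out of it.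
import Mathlib
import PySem

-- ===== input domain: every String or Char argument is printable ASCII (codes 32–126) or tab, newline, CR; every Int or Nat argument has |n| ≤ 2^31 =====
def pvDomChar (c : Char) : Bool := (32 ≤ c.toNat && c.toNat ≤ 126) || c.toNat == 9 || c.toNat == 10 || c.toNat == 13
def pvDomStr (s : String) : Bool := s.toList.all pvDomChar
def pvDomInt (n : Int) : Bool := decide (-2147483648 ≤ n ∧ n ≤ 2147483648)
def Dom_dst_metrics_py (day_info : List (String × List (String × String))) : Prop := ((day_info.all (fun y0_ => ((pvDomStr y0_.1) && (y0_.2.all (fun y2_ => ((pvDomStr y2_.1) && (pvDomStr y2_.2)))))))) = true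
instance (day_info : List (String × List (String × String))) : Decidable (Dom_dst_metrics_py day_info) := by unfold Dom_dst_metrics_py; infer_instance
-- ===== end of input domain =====

-- B builds one type→count dictionary in a single pass instead of A's three scans; return value equivalent on Pre_.

-- ===== PORT A =====
-- d["type"] ported as the total getD with default "" — exact under Pre_ (the key is present)
def pvTypeOf (v : List (String × String)) : String :=
  (PySem.Dict.ofList v).getD "type" ""

def dst_metrics_py (day_info : List (String × List (String × String))) : List (String × Int) :=
  let d := PySem.Dict.ofList day_info
  let total_days : Int := d.size
  let normal_days : Int :=
    d.values.foldl (fun acc v => if pvTypeOf v == "NORMAL" then acc + 1 else acc) 0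
  let spring_days : Int :=
    d.values.foldl (fun acc v => if pvTypeOf v == "SPRING_FORWARD" then acc + 1 else acc) 0
  let fall_days : Int :=
    d.values.foldl (fun acc v => if pvTypeOf v == "FALL_BACK" then acc + 1 else acc) 0
  [("total_days", total_days), ("normal_days", normal_days),
   ("spring_forward_days", spring_days), ("fall_back_days", fall_days),
   ("dst_days", spring_days + fall_days)]

-- ===== PORT B =====
def dst_metrics_py_alt (day_info : List (String × List (String × String))) : List (String × Int) :=
  let d := PySem.Dict.ofList day_info
  let counts : PySem.Dict String Int :=
    d.values.foldl (fun c v => c.modify (pvTypeOf v) 0 (· + 1)) PySem.Dict.empty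
  let spring_days := counts.getD "SPRING_FORWARD" 0
  let fall_days := counts.getD "FALL_BACK" 0
  [("total_days", (d.size : Int)), ("normal_days", counts.getD "NORMAL" 0),
   ("spring_forward_days", spring_days), ("fall_back_days", fall_days),
   ("dst_days", spring_days + fall_days)]

-- ===== PRECONDITION & SPEC =====
-- Pre_ excludes exactly the inputs where Python A raises KeyError: some day's dict lacks the key "type".
def Pre_dst_metrics_py (day_info : List (String × List (String × String))) : Prop :=
  ∀ v ∈ (PySem.Dict.ofList day_info).values, (PySem.Dict.ofList v).contains "type" = true
instance (day_info : List (String × List (String × String))) : Decidable (Pre_dst_metrics_py day_info) := by unfold Pre_dst_metrics_py; infer_instance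

def pvWitness_dst_metrics_py : (List (String × List (String × String))) :=
  [("d1", [("type", "NORMAL")]), ("d2", [("type", "FALL_BACK")])]

def Spec_dst_metrics_py (day_info : List (String × List (String × String))) (out : List (String × Int)) : Prop := out = dst_metrics_py_alt day_info
instance (day_info : List (String × List (String × String))) (out : List (String × Int)) : Decidable (Spec_dst_metrics_py day_info out) := by unfold Spec_dst_metrics_py; infer_instance

-- ===== CLAIM (what is proved, stated in full; the proofs are below) =====
def Claim_equal_dst_metrics_py : Prop := ∀ (day_info : List (String × List (String × String))), Dom_dst_metrics_py day_info → Pre_dst_metrics_py day_info → Spec_dst_metrics_py day_info (dst_metrics_py day_info)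

-- ===== LEMMAS AND PROOFS =====

-- A's conditional 0/1-sum over values equals a count of the mapped type strings.
theorem pv_foldl_if_count (l : List (List (String × String))) (t : String) (acc : Int) :
    l.foldl (fun a v => if pvTypeOf v == t then a + 1 else a) acc
      = acc + ((l.map pvTypeOf).count t : Int) := by
  induction l generalizing acc with
  | nil => simp
  | cons x xs ih =>
    simp only [List.foldl_cons, List.map_cons, ih]
    by_cases h : pvTypeOf x = t
    · simp [h]; ring
    · simp [h]

-- B's counter lookup equals the same count.
theorem pv_counts_getD (l : List (List (String × String))) (t : String) :
    (l.foldl (fun c v => c.modify (pvTypeOf v) 0 (· + 1)) (PySem.Dict.empty : PySem.Dict String Int)).getD t 0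
      = ((l.map pvTypeOf).count t : Int) := by
  have h : (l.foldl (fun c v => c.modify (pvTypeOf v) 0 (· + 1)) (PySem.Dict.empty : PySem.Dict String Int))
      = ((l.map pvTypeOf).foldl (fun c x => c.modify x 0 (· + 1)) PySem.Dict.empty) := by
    rw [List.foldl_map]
  rw [h, PySem.Dict.getD_foldl_modify_add_one]
  simp

-- ===== VERDICT (by name: the statement is the Claim_ definition above) =====
theorem dst_metrics_py_spec : Claim_equal_dst_metrics_py := by
  intro day_info _ _
  show dst_metrics_py day_info = dst_metrics_py_alt day_info
  simp only [dst_metrics_py, dst_metrics_py_alt, pv_counts_getD, pv_foldl_if_count, zero_add]
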